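-- pv_equiv track=rewrite | github.com/mpelos/virtual-agora | src/virtual_agora/flow/cycle_detection.py | _is_normal_progression
-- ===== SOURCE A (Python) =====
-- from typing import Dict, List, Optional, Any, Tuple, Set
--
-- def _is_normal_progression(pattern: List[str]) -> bool:
--     """Check if pattern represents normal progression (not a cycle).
--
--     Args:
--         pattern: Pattern to check
--
--     Returns:
--         True if pattern is normal progression
--     """
--     try:
--         # Convert to integers and check for sequential progression
--         int_pattern = [int(x) for x in pattern]
--
--         # Check if it's an increasing sequence
--         if all(
--             int_pattern[i] < int_pattern[i + 1] for i in range(len(int_pattern) - 1)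
--         ):
--             return True
--
--         # Check if it's a normal phase cycle (0,1,2,3,4 or similar)
--         if len(int_pattern) >= 3 and max(int_pattern) - min(int_pattern) >= 2:
--             return True
--
--     except (ValueError, TypeError):
--         # Not numeric, could still be a cycle
--         pass
--
--     return False
-- ===== SOURCE B (Python) =====
-- def _is_normal_progression(pattern):
--     """Check if pattern represents normal progression (not a cycle).
--
--     Sort-based: a list of ints is strictly increasing iff it equals its own
--     sort and has no duplicates; the spread max-min is last-first of the sort.
--     """
--     try:
--         vals = list(map(int, pattern))
--     except (ValueError, TypeError):
--         return False
--     s = sorted(vals)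
--     if vals == s and len(set(vals)) == len(vals):
--         return True
--     return len(s) >= 3 and s[-1] - s[0] >= 2
-- ===== Notes on version B (the rewrite author's own statement) =====
-- stated objective: alternative
-- what changed: B sorts the parsed integers once and decides both conditions from the sorted list: strict increase becomes 'vals equals its sort and has no duplicates (via set)', and the spread max-min becomes last-minus-first of the sorted list, replacing A's adjacent-index comparisons and separate max/min scans.
import Mathlib
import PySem

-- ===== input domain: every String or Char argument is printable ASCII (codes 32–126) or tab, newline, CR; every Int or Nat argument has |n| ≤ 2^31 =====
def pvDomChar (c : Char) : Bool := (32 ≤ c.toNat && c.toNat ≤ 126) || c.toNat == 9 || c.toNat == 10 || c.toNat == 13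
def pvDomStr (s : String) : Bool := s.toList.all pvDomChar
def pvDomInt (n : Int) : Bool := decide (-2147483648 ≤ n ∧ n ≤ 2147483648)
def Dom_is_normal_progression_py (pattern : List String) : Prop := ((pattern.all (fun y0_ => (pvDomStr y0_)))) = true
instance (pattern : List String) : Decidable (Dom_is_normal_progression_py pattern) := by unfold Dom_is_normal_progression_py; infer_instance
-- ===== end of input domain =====

-- B replaces A's adjacent-index comparisons and max/min scans by a sort: strictly
-- increasing = equal to its own sort with no duplicates; spread = last - first of the sort.

-- ===== PORT A =====
-- the comprehension [int(x) for x in pattern]; none = the ValueError the try/except catches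
def pvParse : List String → Option (List Int)
  | [] => some []
  | x :: xs =>
    match PySem.Int.ofStr? x with
    | none => none
    | some v =>
      match pvParse xs with
      | none => none
      | some t => some (v :: t)

def is_normal_progression_py (pattern : List String) : Bool :=
  match pvParse pattern with
  | none => false
  | some int_pattern =>
    if (PySem.List.pyRange 0 ((int_pattern.length : Int) - 1) 1).all
        (fun i => decide (PySem.List.pyGetD int_pattern i 0 < PySem.List.pyGetD int_pattern (i + 1) 0)) then
      true
    else if (decide (int_pattern.length ≥ 3)) &&
        (match PySem.List.max? int_pattern (fun y => y), PySem.List.min? int_pattern (fun y => y) with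
         | some mx, some mn => decide (mx - mn ≥ 2)
         | _, _ => false) then
      true
    else
      false

-- ===== PORT B =====
-- list(map(int, pattern)); none = the ValueError the try/except catches
def pvMapInt (xs : List String) : Option (List Int) :=
  xs.mapM PySem.Int.ofStr?

def is_normal_progression_py_alt (pattern : List String) : Bool :=
  match pvMapInt pattern with
  | some vals =>
    let s := PySem.List.sorted vals (fun x => x) false
    if vals = s ∧ (PySem.Set.ofList vals).length = vals.length then
      true
    else
      (decide (s.length ≥ 3)) &&
        (match PySem.List.pyGet? s (-1) with
         | some last =>
           match PySem.List.pyGet? s 0 with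
           | some first => decide (last - first ≥ 2)
           | none => false
         | none => false)
  | none => false

-- ===== PRECONDITION & SPEC =====
def Spec_is_normal_progression_py (pattern : List String) (out : Bool) : Prop := out = is_normal_progression_py_alt pattern
instance (pattern : List String) (out : Bool) : Decidable (Spec_is_normal_progression_py pattern out) := by unfold Spec_is_normal_progression_py; infer_instance

-- ===== CLAIM (what is proved, stated in full; the proofs are below) =====
def Claim_equal_is_normal_progression_py : Prop := ∀ (pattern : List String), Dom_is_normal_progression_py pattern → Spec_is_normal_progression_py pattern (is_normal_progression_py pattern)

-- ===== LEMMAS AND PROOFS =====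

lemma pvMapInt_eq_parse (xs : List String) : pvMapInt xs = pvParse xs := by
  induction xs with
  | nil => rfl
  | cons x xs ih =>
    simp only [pvMapInt, List.mapM_cons, pvParse] at ih ⊢
    cases PySem.Int.ofStr? x with
    | none => rfl
    | some v =>
      rw [ih]
      cases pvParse xs <;> rfl

-- A's index-range check decides strict increase
lemma pvRangeAll_eq (l : List Int) :
    ((PySem.List.pyRange 0 ((l.length : Int) - 1) 1).all
      (fun i => decide (PySem.List.pyGetD l i 0 < PySem.List.pyGetD l (i + 1) 0)))
    = decide (List.IsChain (· < ·) l) := by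
  rw [Bool.eq_iff_iff]
  simp only [List.all_eq_true, decide_eq_true_eq, PySem.List.mem_pyRange_one]
  rw [List.isChain_iff_getElem]
  constructor
  · intro h i hi
    have h0 : (0 : Int) ≤ (i : Int) := Int.natCast_nonneg i
    have := h (i : Int) ⟨h0, by omega⟩
    rw [PySem.List.pyGetD_eq_getElem _ _ h0 (by omega),
        PySem.List.pyGetD_eq_getElem _ _ (by omega) (by omega)] at this
    simpa [show ((i : Int) + 1).toNat = i + 1 by omega] using this
  · rintro h i ⟨h0, h1⟩
    have := h i.toNat (by omega)
    rw [PySem.List.pyGetD_eq_getElem _ _ h0 (by omega),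
        PySem.List.pyGetD_eq_getElem _ _ (by omega) (by omega)]
    simpa [show (i + 1).toNat = i.toNat + 1 by omega] using this

-- set(xs) is a sublist of xs
lemma pvOfListSublist {a : Type} [BEq a] [LawfulBEq a] (l : List a) :
    (PySem.Set.ofList l).Sublist l := by
  induction l with
  | nil => simp [PySem.Set.ofList_nil]
  | cons x xs ih =>
    rw [PySem.Set.ofList_cons]
    refine List.Sublist.cons₂ x (List.Sublist.trans ?_ ih)
    simp [PySem.Set.discard, List.filter_sublist (l := PySem.Set.ofList xs)]

-- B's sort-based test decides strict increase
lemma pvSortTest_eq (l : List Int) :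
    (l = PySem.List.sorted l (fun x => x) false ∧ (PySem.Set.ofList l).length = l.length)
    ↔ List.IsChain (· < ·) l := by
  rw [List.isChain_iff_pairwise]
  constructor
  · rintro ⟨hs, hn⟩
    have he : PySem.Set.ofList l = l := (pvOfListSublist l).eq_of_length hn
    have hnod : l.Nodup := he ▸ PySem.Set.nodup_ofList l
    have hle : l.Pairwise (· ≤ ·) := by
      rw [hs]; exact PySem.List.sorted_pairwise l (fun x => x)
    exact (hle.and hnod).imp (fun h => lt_of_le_of_ne h.1 h.2)
  · intro h
    have hle : l.Pairwise (· ≤ ·) := h.imp le_of_lt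
    have hnod : l.Nodup := h.imp ne_of_lt
    refine ⟨(PySem.List.sorted_eq_self_of_pairwise l (fun x => x) hle).symm, ?_⟩
    rw [PySem.Set.ofList_eq_self_of_nodup l hnod]

-- on the else branch: last/first of the sort are A's max/min
lemma pvExtrema (a : Int) (t : List Int) :
    PySem.List.pyGet? (PySem.List.sorted (a :: t) (fun x => x) false) (-1)
      = some (t.foldl max a) ∧
    PySem.List.pyGet? (PySem.List.sorted (a :: t) (fun x => x) false) 0
      = some (t.foldl min a) := by
  have hlen : (PySem.List.sorted (a :: t) (fun x => x) false).length = t.length + 1 := by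
    rw [PySem.List.length_sorted]; rfl
  constructor
  · rw [PySem.List.pyGet?_neg_one, List.getLast?_eq_getElem?]
    have hidx : (PySem.List.sorted (a :: t) (fun x => x) false).length - 1
        < (PySem.List.sorted (a :: t) (fun x => x) false).length := by omega
    rw [List.getElem?_eq_getElem hidx]
    congr 1
    apply le_antisymm
    · have hmem : (PySem.List.sorted (a :: t) (fun x => x) false)[(PySem.List.sorted (a :: t) (fun x => x) false).length - 1] ∈ (a :: t) :=
        (PySem.List.mem_sorted _ _ _ _).mp (List.getElem_mem _)
      rcases List.mem_cons.mp hmem with h | h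
      · rw [h]; exact (PySem.List.le_foldl_max t a).1
      · exact (PySem.List.le_foldl_max t a).2 _ h
    · have hmem : t.foldl max a ∈ (a :: t) := by
        rcases PySem.List.foldl_max_mem t a with h | h
        · rw [h]; exact List.mem_cons_self
        · exact List.mem_cons_of_mem _ h
      have hms : t.foldl max a ∈ PySem.List.sorted (a :: t) (fun x => x) false :=
        (PySem.List.mem_sorted _ _ _ _).mpr hmem
      obtain ⟨i, hi, hie⟩ := List.mem_iff_getElem.mp hms
      calc t.foldl max a = (PySem.List.sorted (a :: t) (fun x => x) false)[i] := hie.symm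
        _ ≤ (PySem.List.sorted (a :: t) (fun x => x) false)[(PySem.List.sorted (a :: t) (fun x => x) false).length - 1] :=
          PySem.List.sorted_id_getElem_mono _ (by omega) (by omega)
  · have hmn : t.foldl min a ∈ (a :: t) := by
      rcases PySem.List.foldl_min_mem t a with h | h
      · rw [h]; exact List.mem_cons_self
      · exact List.mem_cons_of_mem _ h
    cases hcs : PySem.List.sorted (a :: t) (fun x => x) false with
    | nil => rw [hcs] at hlen; simp at hlen
    | cons m t' =>
      rw [PySem.List.pyGet?_zero_cons]
      congr 1
      have hhead := PySem.List.key_head_sorted_le (a :: t) (fun x => x) hcs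
      apply le_antisymm
      · exact hhead _ hmn
      · have hm : m ∈ (a :: t) := (PySem.List.mem_sorted _ _ _ _).mp (hcs ▸ List.mem_cons_self)
        rcases List.mem_cons.mp hm with h | h
        · rw [h]; exact (PySem.List.foldl_min_le t a).1
        · exact (PySem.List.foldl_min_le t a).2 _ h

-- ===== VERDICT (by name: the statement is the Claim_ definition above) =====
theorem is_normal_progression_py_spec : Claim_equal_is_normal_progression_py := by
  intro pattern _
  unfold Spec_is_normal_progression_py is_normal_progression_py is_normal_progression_py_alt
  rw [pvMapInt_eq_parse]
  cases hp : pvParse pattern with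
  | none => rfl
  | some l =>
    simp only
    cases l with
    | nil => decide
    | cons a t =>
      rw [pvRangeAll_eq]
      obtain ⟨hlast, hfirst⟩ := pvExtrema a t
      by_cases hch : List.IsChain (· < ·) (a :: t)
      · simp only [hch, decide_true, if_true]
        rw [if_pos ((pvSortTest_eq (a :: t)).mpr hch)]
      · have hns : ¬ ((a :: t) = PySem.List.sorted (a :: t) (fun x => x) false ∧
            (PySem.Set.ofList (a :: t)).length = (a :: t).length) :=
          fun h => hch ((pvSortTest_eq (a :: t)).mp h)
        simp only [hch, decide_false, Bool.false_eq_true, if_false,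
          PySem.List.max?_id_cons, PySem.List.min?_id_cons, hlast, hfirst,
          PySem.List.length_sorted]
        rw [if_neg hns]
        cases hb : (decide ((a :: t).length ≥ 3) && decide (t.foldl max a - t.foldl min a ≥ 2)) <;> simp
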